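-- pv_equiv track=rewrite | github.com/gjbex/worker-ng | scripts/worker/pbs_torque/option_parser.py | _merge_resources
-- ===== SOURCE A (Python) =====
-- def _normalize_resources(resources):
--     resource_dict = {}
--     for resource in resources:
--         parts = resource.split(',')
--         for part in parts:
--             key, value = part.split('=', maxsplit=1)
--             resource_dict[key] = value
--     return resource_dict
--
-- def _merge_resources(old_resources, new_resources):
--     if old_resources is None:
--         return new_resources
--     if new_resources is None:
--         return old_resources
--     resources = _normalize_resources(old_resources)
--     resources.update(_normalize_resources(new_resources))
--     return [f'{key}={value}' for key, value in resources.items()]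
-- ===== SOURCE B (Python) =====
-- def _merge_resources(old_resources, new_resources):
--     if old_resources is None:
--         return new_resources
--     if new_resources is None:
--         return old_resources
--     pairs = [part.split('=', maxsplit=1)
--              for resource in old_resources + new_resources
--              for part in resource.split(',')]
--
--     def collapse(pairs):
--         if not pairs:
--             return []
--         (key, value), *rest = pairs
--         for k, v in rest:
--             if k == key:
--                 value = v
--         return [key + '=' + value] + collapse([p for p in rest if p[0] != key])
--
--     return collapse(pairs)
-- ===== Notes on version B (the rewrite author's own statement) =====
-- stated objective: alternative
-- what changed: Drops the dict entirely: B flattens both lists into one key=value pair list and emits the merged entries by structural recursion that, for each first occurrence of a key, scans the remainder for the last overriding value and recurses on the rest with that key filtered out.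
import Mathlib
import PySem

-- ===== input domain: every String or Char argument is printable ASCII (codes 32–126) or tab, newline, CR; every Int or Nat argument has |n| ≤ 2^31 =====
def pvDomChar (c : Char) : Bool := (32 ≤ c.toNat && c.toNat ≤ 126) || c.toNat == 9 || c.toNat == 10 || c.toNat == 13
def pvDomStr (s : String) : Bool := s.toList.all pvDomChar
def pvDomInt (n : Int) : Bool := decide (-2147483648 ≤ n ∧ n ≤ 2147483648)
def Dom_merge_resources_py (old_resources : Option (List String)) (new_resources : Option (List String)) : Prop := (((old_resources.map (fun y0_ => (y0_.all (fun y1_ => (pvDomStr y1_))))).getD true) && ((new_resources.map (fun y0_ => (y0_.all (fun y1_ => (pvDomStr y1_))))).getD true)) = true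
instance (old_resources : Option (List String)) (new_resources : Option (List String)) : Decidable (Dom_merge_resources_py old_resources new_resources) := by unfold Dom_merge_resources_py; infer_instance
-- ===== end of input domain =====

-- B drops the dict entirely: one flattened pair list, then a structural recursion that emits each
-- first-occurring key with the last value seen for it and recurses on the rest with that key removed
-- (objective: alternative — same result by a dict-free algorithm; not faster).

-- ===== PORT A =====
-- helper _normalize_resources, transliterated
def normalize_resources_py (resources : List String) : PySem.Dict String String :=
  resources.foldl
    (fun resource_dict resource =>
      ((PySem.Str.split? resource ",").getD []).foldl
        (fun resource_dict part =>
          match PySem.Str.splitMax? part "=" 1 with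
          | some [key, value] => resource_dict.insert key value
          | _ => resource_dict)  -- Python raises ValueError here; excluded by Pre_
        resource_dict)
    PySem.Dict.empty

def merge_resources_py (old_resources : Option (List String)) (new_resources : Option (List String)) : Option (List String) :=
  match old_resources with
  | none => new_resources
  | some olds =>
    match new_resources with
    | none => old_resources
    | some news =>
      let resources := (normalize_resources_py olds).update (normalize_resources_py news).items
      some (resources.items.map (fun p => p.1 ++ "=" ++ p.2))

-- ===== PORT B =====
-- helper collapse, transliterated: head pair's key, last overriding value from the rest,
-- recurse on the rest with that key filtered out
def pvCollapse (pairs : List (String × String)) : List String :=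
  match pairs with
  | [] => []
  | (key, value) :: rest =>
    [key ++ "=" ++ rest.foldl (fun value q => if q.1 == key then q.2 else value) value]
      ++ pvCollapse (rest.filter (fun p => p.1 != key))
termination_by pairs.length
decreasing_by
  simp only [List.length_unattach, List.length_cons]
  exact Nat.lt_succ_of_le (Nat.le_trans (List.length_filter_le _ _) (Nat.le_of_eq List.length_attach))

def merge_resources_py_alt (old_resources : Option (List String)) (new_resources : Option (List String)) : Option (List String) :=
  match old_resources with
  | none => new_resources
  | some olds =>
    match new_resources with
    | none => old_resources
    | some news =>
      let pairs : List (String × String) :=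
        ((olds ++ news).flatMap (fun resource => (PySem.Str.split? resource ",").getD [])).filterMap
          (fun part =>
            match PySem.Str.splitMax? part "=" 1 with
            | some [key, value] => some (key, value)
            | _ => none)  -- Python raises ValueError here; excluded by Pre_
      some (pvCollapse pairs)

-- ===== PRECONDITION & SPEC =====
-- Pre_ excludes exactly the inputs where some comma-separated part lacks '=': there
-- Python A raises ValueError ('key, value = part.split(...)' fails to unpack), and so does B.
def Pre_merge_resources_py (old_resources : Option (List String)) (new_resources : Option (List String)) : Prop :=
  ∀ olds ∈ old_resources, ∀ news ∈ new_resources, ∀ r ∈ olds ++ news,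
    ∀ p ∈ (PySem.Str.split? r ",").getD [], PySem.Str.isIn "=" p = true

instance (old_resources : Option (List String)) (new_resources : Option (List String)) : Decidable (Pre_merge_resources_py old_resources new_resources) := by unfold Pre_merge_resources_py; infer_instance

def pvWitness_merge_resources_py : Option (List String) × Option (List String) :=
  (some ["walltime=01:00:00,nodes=2", "mem=4gb"], some ["nodes=4"])

def Spec_merge_resources_py (old_resources : Option (List String)) (new_resources : Option (List String)) (out : Option (List String)) : Prop := out = merge_resources_py_alt old_resources new_resources
instance (old_resources : Option (List String)) (new_resources : Option (List String)) (out : Option (List String)) : Decidable (Spec_merge_resources_py old_resources new_resources out) := by unfold Spec_merge_resources_py; infer_instance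

-- ===== CLAIM (what is proved, stated in full; the proofs are below) =====
def Claim_equal_merge_resources_py : Prop := ∀ (old_resources : Option (List String)) (new_resources : Option (List String)), Dom_merge_resources_py old_resources new_resources → Pre_merge_resources_py old_resources new_resources → Spec_merge_resources_py old_resources new_resources (merge_resources_py old_resources new_resources)

-- ===== LEMMAS AND PROOFS =====

-- the shared per-part step of A, and its reduction to plain pair inserts
def pvStep (d : PySem.Dict String String) (part : String) : PySem.Dict String String :=
  match PySem.Str.splitMax? part "=" 1 with
  | some [key, value] => d.insert key value
  | _ => d

def pvExtract (parts : List String) : List (String × String) :=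
  parts.filterMap (fun part =>
    match PySem.Str.splitMax? part "=" 1 with
    | some [key, value] => some (key, value)
    | _ => none)

def pvIns (d : PySem.Dict String String) (p : String × String) : PySem.Dict String String :=
  d.insert p.1 p.2

theorem pvFoldlStep (parts : List String) : ∀ d,
    parts.foldl pvStep d = (pvExtract parts).foldl pvIns d := by
  induction parts with
  | nil => intro d; rfl
  | cons p t ih =>
    intro d
    simp only [List.foldl_cons, pvExtract, List.filterMap_cons]
    cases h : PySem.Str.splitMax? p "=" 1 with
    | none => simpa [pvStep, h, pvExtract] using ih (pvStep d p)
    | some l =>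
      match l with
      | [] => simpa [pvStep, h, pvExtract] using ih (pvStep d p)
      | [k] => simpa [pvStep, h, pvExtract] using ih (pvStep d p)
      | k :: v :: rest =>
        match rest with
        | [] => simpa [pvStep, h, pvExtract, pvIns] using ih (d.insert k v)
        | _ :: _ => simpa [pvStep, h, pvExtract] using ih (pvStep d p)

theorem pvInsertComm {κ ν : Type} [BEq κ] [LawfulBEq κ] (d : PySem.Dict κ ν) (k k' : κ) (v w : ν)
    (hk : d.contains k = true) (hne : k' ≠ k) :
    (d.insert k' w).insert k v = (d.insert k v).insert k' w := by
  apply PySem.Dict.ext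
  cases hc' : d.contains k' with
  | true =>
    rw [PySem.Dict.items_insert_of_contains _ v (by simp [PySem.Dict.contains_insert, hk]),
        PySem.Dict.items_insert_of_contains _ w hc',
        PySem.Dict.items_insert_of_contains _ w (by simp [PySem.Dict.contains_insert, hc']),
        PySem.Dict.items_insert_of_contains _ v hk]
    simp only [List.map_map]
    apply List.map_congr_left
    intro p _
    by_cases h1 : p.1 = k
    · simp [Function.comp, h1, Ne.symm hne]
    · by_cases h2 : p.1 = k'
      · simp [Function.comp, h2, hne]
      · simp [Function.comp, h1, h2]
  | false =>
    rw [PySem.Dict.items_insert_of_contains _ v (by simp [PySem.Dict.contains_insert, hk]),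
        PySem.Dict.items_insert_of_not_contains _ w hc',
        PySem.Dict.items_insert_of_not_contains _ w (by simp [PySem.Dict.contains_insert, hc', hne]),
        PySem.Dict.items_insert_of_contains _ v hk]
    simp [List.map_append, hne]

theorem pvFoldlInsertLate (k : String) (v : String) : ∀ (t : List (String × String)) (a : PySem.Dict String String),
    a.contains k = true → (∀ p ∈ t, p.1 ≠ k) →
    (t.foldl pvIns a).insert k v = t.foldl pvIns (a.insert k v) := by
  intro t
  induction t with
  | nil => intro a _ _; rfl
  | cons p t ih =>
    intro a hk hne
    simp only [List.foldl_cons]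
    rw [ih (pvIns a p) (by simp [pvIns, PySem.Dict.contains_insert, hk])
        (fun q hq => hne q (List.mem_cons_of_mem _ hq))]
    have : pvIns (a.insert k v) p = (pvIns a p).insert k v := by
      simp only [pvIns]
      exact (pvInsertComm a k p.1 v p.2 hk (hne p (by simp))).symm
    rw [this]

theorem pvFoldlMapReplace (k : String) (v : String) :
    ∀ (ps : List (String × String)) (d : PySem.Dict String String),
    (ps.map Prod.fst).Nodup → k ∈ ps.map Prod.fst →
    (ps.map (fun p => if p.1 == k then (k, v) else p)).foldl pvIns d = (ps.foldl pvIns d).insert k v := by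
  intro ps
  induction ps with
  | nil => intro d _ h; simp at h
  | cons p t ih =>
    intro d hnd hmem
    rw [List.map_cons] at hnd hmem
    rw [List.nodup_cons] at hnd
    rw [List.map_cons]
    by_cases h1 : p.1 = k
    · subst h1
      have ht : ∀ q ∈ t, q.1 ≠ p.1 := fun q hq hqk =>
        hnd.1 (hqk ▸ List.mem_map.mpr ⟨q, hq, rfl⟩)
      have hmapid : t.map (fun q => if q.1 == p.1 then (p.1, v) else q) = t := by
        have := List.map_congr_left (l := t)
          (f := fun q => if q.1 == p.1 then (p.1, v) else q) (g := id)
          (fun q hq => by simp [ht q hq])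
        simpa using this
      have hhead : (if p.1 == p.1 then (p.1, v) else p) = (p.1, v) := by simp
      rw [List.foldl_cons, List.foldl_cons, hhead, hmapid]
      rw [pvFoldlInsertLate p.1 v t (pvIns d p)
        (by simp [pvIns, PySem.Dict.contains_insert_self]) ht]
      congr 1
      show d.insert p.1 v = (d.insert p.1 p.2).insert p.1 v
      rw [PySem.Dict.insert_insert_self]
    · have hhead : (if p.1 == k then (k, v) else p) = p := by simp [h1]
      rw [List.foldl_cons, List.foldl_cons, hhead]
      refine ih (pvIns d p) hnd.2 ?_
      rcases List.mem_cons.mp hmem with h | h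
      · exact absurd h.symm h1
      · exact h

theorem pvFoldlInsertItems (k : String) (v : String) (e : PySem.Dict String String)
    (hnd : e.keys.Nodup) (d : PySem.Dict String String) :
    ((e.insert k v).items).foldl pvIns d = ((e.items).foldl pvIns d).insert k v := by
  cases hc : e.contains k with
  | false =>
    rw [PySem.Dict.items_insert_of_not_contains _ v hc, List.foldl_append]
    rfl
  | true =>
    rw [PySem.Dict.items_insert_of_contains _ v hc]
    apply pvFoldlMapReplace k v e.items d
    · simpa [PySem.Dict.keys] using hnd
    · have := (PySem.Dict.contains_iff_mem_keys _ _).mp hc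
      simpa [PySem.Dict.keys] using this

theorem pvNodupKeysFold (l : List (String × String)) :
    (l.foldl pvIns PySem.Dict.empty).keys.Nodup := by
  have := PySem.Dict.nodup_keys_foldl_insert_key l Prod.fst (fun _ p => p.2)
    PySem.Dict.empty (by simp)
  simpa [pvIns] using this

theorem pvFoldlNormal : ∀ (l : List (String × String)) (d : PySem.Dict String String),
    ((l.foldl pvIns PySem.Dict.empty).items).foldl pvIns d = l.foldl pvIns d := by
  intro l
  induction l using List.reverseRecOn with
  | nil => intro d; simp [PySem.Dict.empty]
  | append_singleton t p ih =>
    intro d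
    rw [List.foldl_append, List.foldl_append]
    simp only [List.foldl_cons, List.foldl_nil]
    show ((t.foldl pvIns PySem.Dict.empty).insert p.1 p.2).items.foldl pvIns d = pvIns (t.foldl pvIns d) p
    rw [pvFoldlInsertItems p.1 p.2 _ (pvNodupKeysFold t) d, ih d]
    rfl

-- flatten the nested loop
theorem pvFoldlFlatMap {α β : Type} (f : α → List String) (g : β → String → β) :
    ∀ (l : List α) (a : β), (l.flatMap f).foldl g a = l.foldl (fun acc x => (f x).foldl g acc) a := by
  intro l
  induction l with
  | nil => intro a; rfl
  | cons x t ih => intro a; simp only [List.flatMap_cons, List.foldl_append, List.foldl_cons]; exact ih _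

theorem pvNormalizeEq (xs : List String) :
    normalize_resources_py xs
      = (pvExtract (xs.flatMap (fun r => (PySem.Str.split? r ",").getD []))).foldl pvIns PySem.Dict.empty := by
  rw [← pvFoldlStep, pvFoldlFlatMap]
  rfl

theorem pvUpdateEq (d : PySem.Dict String String) (l : List (String × String)) :
    d.update l = l.foldl pvIns d := by
  rfl

-- ===== closed forms shared by both sides =====

-- the value step for one key: last assignment wins
def pvLast (k : String) (L : List (String × String)) (a : String) : String :=
  L.foldl (fun value q => if q.1 == k then q.2 else value) a

theorem pvGetDFold (k : String) : ∀ (L : List (String × String)) (d : PySem.Dict String String),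
    (L.foldl pvIns d).getD k "" = pvLast k L (d.getD k "") := by
  intro L
  induction L with
  | nil => intro d; rfl
  | cons p t ih =>
    intro d
    show (t.foldl pvIns (pvIns d p)).getD k "" = pvLast k (p :: t) (d.getD k "")
    rw [ih (pvIns d p)]
    unfold pvLast
    simp only [List.foldl_cons]
    congr 1
    show (d.insert p.1 p.2).getD k "" = if p.1 == k then p.2 else d.getD k ""
    rw [PySem.Dict.getD_insert]
    by_cases h : p.1 = k
    · simp [h]
    · simp [h, Ne.symm h]

theorem pvKeysFold (L : List (String × String)) :
    (L.foldl pvIns PySem.Dict.empty).keys = PySem.List.dedup (L.map Prod.fst) := by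
  rw [show List.foldl pvIns PySem.Dict.empty L
        = List.foldl (fun d x => d.insert (Prod.fst x)
            ((fun (_ : PySem.Dict String String) (p : String × String) => p.2) d x))
            PySem.Dict.empty L from rfl,
      PySem.Dict.keys_foldl_insert_key]
  simp [PySem.Dict.keys, PySem.Dict.empty, PySem.Set.update_nil_left, PySem.List.dedup]

-- A's dict, in closed form: first-occurrence keys, each with its last value
theorem pvItemsClosed (L : List (String × String)) :
    (L.foldl pvIns PySem.Dict.empty).items
      = (PySem.List.dedup (L.map Prod.fst)).map (fun k => (k, pvLast k L "")) := by
  rw [PySem.Dict.items_eq_map_keys _ (pvNodupKeysFold L) "", pvKeysFold]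
  apply List.map_congr_left
  intro k _
  rw [pvGetDFold k L PySem.Dict.empty]
  simp [PySem.Dict.getD_empty]

-- filtering out a different key does not change the last value for k
theorem pvLastFilter (k j : String) (hkj : k ≠ j) : ∀ (L : List (String × String)) (a : String),
    pvLast k (L.filter (fun p => p.1 != j)) a = pvLast k L a := by
  intro L
  induction L with
  | nil => intro a; rfl
  | cons p t ih =>
    intro a
    by_cases h : p.1 = j
    · have : (p.1 != j) = false := by simp [h]
      simp only [List.filter_cons, this, Bool.false_eq_true, if_false, pvLast, List.foldl_cons]
      have hpk : (p.1 == k) = false := by simp [h, Ne.symm hkj]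
      simpa [pvLast, hpk] using ih a
    · have : (p.1 != j) = true := by simp [h]
      simp only [List.filter_cons, this, if_true, pvLast, List.foldl_cons]
      exact ih _

-- dedup commutes with filter
theorem pvDedupFilter (j : String) : ∀ (xs : List String),
    (PySem.Set.ofList xs).discard j = PySem.Set.ofList (xs.filter (fun x => x != j)) := by
  intro xs
  induction xs using List.reverseRecOn with
  | nil => rfl
  | append_singleton t x ih =>
    rw [PySem.Set.ofList_append_singleton, List.filter_append]
    by_cases h : x = j
    · have : (x != j) = false := by simp [h]
      simp only [List.filter_cons, this, Bool.false_eq_true, if_false, List.filter_nil, List.append_nil]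
      rw [← ih, PySem.Set.add_eq_ite]
      split_ifs with hm
      · rfl
      · simp [PySem.Set.discard, List.filter_append, h]
    · have hx : (x != j) = true := by simp [h]
      simp only [List.filter_cons, hx, if_true, List.filter_nil]
      rw [PySem.Set.ofList_append_singleton, ← ih]
      rw [PySem.Set.add_eq_ite, PySem.Set.add_eq_ite]
      have hmem : x ∈ PySem.Set.ofList t ↔ x ∈ (PySem.Set.ofList t).discard j := by
        rw [PySem.Set.mem_discard]
        exact ⟨fun hm => ⟨hm, h⟩, fun hm => hm.1⟩
      by_cases hm : x ∈ PySem.Set.ofList t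
      · rw [if_pos hm, if_pos (hmem.mp hm)]
      · rw [if_neg hm, if_neg (fun c => hm (hmem.mpr c))]
        simp [PySem.Set.discard, List.filter_append, h]

-- B's recursion computes exactly that closed form
theorem pvCollapseClosedAux : ∀ (n : Nat) (L : List (String × String)), L.length ≤ n →
    pvCollapse L = (PySem.List.dedup (L.map Prod.fst)).map (fun k => k ++ "=" ++ pvLast k L "") := by
  intro n
  induction n with
  | zero =>
    intro L hL
    match L with
    | [] => rw [pvCollapse]; rfl
  | succ n ih =>
    intro L hL
    match L with
    | [] => rw [pvCollapse]; rfl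
    | (key, value) :: rest =>
      rw [pvCollapse]
      rw [ih (rest.filter (fun p => p.1 != key))
        (Nat.le_trans (List.length_filter_le _ _) (by simpa using hL))]
      have hdedup : PySem.List.dedup (((key, value) :: rest).map Prod.fst)
          = key :: ((PySem.Set.ofList (rest.map Prod.fst)).discard key) := by
        simp [PySem.List.dedup, PySem.Set.ofList_cons]
      rw [hdedup, List.map_cons, List.singleton_append]
      congr 1
      · have : pvLast key ((key, value) :: rest) "" = pvLast key rest value := by
          simp [pvLast]
        rw [this]
        rfl
      · have hmapfst : (rest.filter (fun p => p.1 != key)).map Prod.fst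
            = (rest.map Prod.fst).filter (fun x => x != key) := by
          rw [List.filter_map]
          rfl
        rw [hmapfst]
        simp only [PySem.List.dedup]
        rw [← pvDedupFilter]
        apply List.map_congr_left
        intro k hk
        have hkne : k ≠ key := ((PySem.Set.mem_discard _ _ _).mp hk).2
        rw [pvLastFilter k key hkne]
        have : pvLast k ((key, value) :: rest) "" = pvLast k rest "" := by
          simp [pvLast, Ne.symm hkne]
        rw [this]

theorem pvCollapseClosed (L : List (String × String)) :
    pvCollapse L = (PySem.List.dedup (L.map Prod.fst)).map (fun k => k ++ "=" ++ pvLast k L "") :=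
  pvCollapseClosedAux L.length L (Nat.le_refl _)

-- ===== VERDICT (by name: the statement is the Claim_ definition above) =====
theorem merge_resources_py_spec : Claim_equal_merge_resources_py := by
  intro o n _ _
  unfold Spec_merge_resources_py
  cases o with
  | none => rfl
  | some olds =>
    cases n with
    | none => rfl
    | some news =>
      simp only [merge_resources_py, merge_resources_py_alt]
      congr 1
      have hdict :
          (normalize_resources_py olds).update (normalize_resources_py news).items
            = (pvExtract ((olds ++ news).flatMap (fun r => (PySem.Str.split? r ",").getD []))).foldl pvIns PySem.Dict.empty := by
        rw [pvUpdateEq, pvNormalizeEq news, pvFoldlNormal, pvNormalizeEq olds,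
            List.flatMap_append]
        simp only [pvExtract, List.filterMap_append, List.foldl_append]
      rw [hdict, pvItemsClosed,
          show ((olds ++ news).flatMap (fun r => (PySem.Str.split? r ",").getD [])).filterMap
            (fun part => match PySem.Str.splitMax? part "=" 1 with
              | some [key, value] => some (key, value)
              | _ => none)
            = pvExtract ((olds ++ news).flatMap (fun r => (PySem.Str.split? r ",").getD [])) from rfl,
          pvCollapseClosed, List.map_map]
      rfl
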